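-- pv_equiv track=rewrite | github.com/osipovvs/Works | number_system.py | oct2dec
-- ===== SOURCE A (Python) =====
-- oct_chars = ['0', '1', '2', '3', '4', '5', '6', '7']
--
-- def oct2dec(number):
--     fstr = str(number)
--     flst = list(fstr)
--     res = 0
--     flag = True
--
--     for i in flst:
--         if i not in oct_chars:
--             flag = False
--
--     if flag:
--         for i in range(len(flst)):
--             res += int(flst[i]) * 8 ** (len(flst) - (i + 1))
--
--         return res
-- ===== SOURCE B (Python) =====
-- def oct2dec(number):
--     res = 0
--     for ch in str(number):
--         d = ord(ch) - 48
--         if 0 <= d <= 7: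
--             res = res * 8 + d
--         else:
--             return None
--     return res
-- ===== Notes on version B (the rewrite author's own statement) =====
-- stated objective: faster
-- what changed: Replaced the two-pass validate-then-sum with big-power terms (8 ** (n-i-1) recomputed per digit) by a single-pass Horner accumulation res = res*8 + d that validates and accumulates in one loop.
import Mathlib
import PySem

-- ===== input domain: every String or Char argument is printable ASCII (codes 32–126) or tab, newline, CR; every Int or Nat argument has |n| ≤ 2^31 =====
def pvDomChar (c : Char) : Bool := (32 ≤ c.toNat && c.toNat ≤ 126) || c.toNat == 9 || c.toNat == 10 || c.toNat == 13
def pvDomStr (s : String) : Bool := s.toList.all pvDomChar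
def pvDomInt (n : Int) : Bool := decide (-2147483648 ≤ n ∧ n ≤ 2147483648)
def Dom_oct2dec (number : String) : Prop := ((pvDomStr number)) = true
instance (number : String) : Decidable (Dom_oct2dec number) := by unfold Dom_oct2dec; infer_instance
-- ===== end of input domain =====

-- B replaces A's two passes with per-digit 8**k powers by a single-pass Horner accumulation (objective: faster; measured).


-- ===== PORT A =====
-- oct_chars
def octChars : List Char := ['0', '1', '2', '3', '4', '5', '6', '7']

-- literal port of A: first pass sets flag, second pass sums int(flst[i]) * 8 ** (len - (i+1)).
-- int(flst[i]) is ported as (code - 48), exact for the octal digit chars the flag guard admits.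
def oct2dec (number : String) : Option Int :=
  let flst := number.toList
  let flag := flst.foldl (fun flag i => if i ∉ octChars then false else flag) true
  if flag then
    some ((List.range flst.length).foldl
      (fun res i => res + (((flst.getD i ' ').toNat : Int) - 48) * 8 ^ (flst.length - (i + 1))) 0)
  else none

-- ===== PORT B =====
-- B: single-pass Horner loop; ord(ch)-48 validated in the same pass, early None on a bad char
def hornerGo (acc : Int) : List Char → Option Int
  | [] => some acc
  | c :: cs =>
      let d : Int := (c.toNat : Int) - 48
      if 0 ≤ d ∧ d ≤ 7 then hornerGo (acc * 8 + d) cs else none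

def oct2dec_alt (number : String) : Option Int := hornerGo 0 number.toList

-- ===== PRECONDITION & SPEC =====
def Spec_oct2dec (number : String) (out : Option Int) : Prop := out = oct2dec_alt number
instance (number : String) (out : Option Int) : Decidable (Spec_oct2dec number out) := by unfold Spec_oct2dec; infer_instance

-- ===== CLAIM (what is proved, stated in full; the proofs are below) =====
def Claim_equal_oct2dec : Prop := ∀ (number : String), Dom_oct2dec number → Spec_oct2dec number (oct2dec number)

-- ===== LEMMAS AND PROOFS =====

-- canonical value of an octal digit list
def octVal : List Char → Int
  | [] => 0
  | c :: cs => ((c.toNat : Int) - 48) * 8 ^ cs.length + octVal cs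

theorem octChar_iff (c : Char) :
    c ∈ octChars ↔ (0 ≤ (c.toNat : Int) - 48 ∧ (c.toNat : Int) - 48 ≤ 7) := by
  constructor
  · intro h
    fin_cases h <;> simp
  · rintro ⟨h1, h2⟩
    have h48 : 48 ≤ c.toNat := by omega
    have h55 : c.toNat ≤ 55 := by omega
    have hofn : Char.ofNat c.toNat = c := Char.ofNat_toNat c
    interval_cases h : c.toNat <;>
      · rw [← hofn]; decide

theorem flag_eq (l : List Char) (b : Bool) :
    l.foldl (fun flag i => if i ∉ octChars then false else flag) b
      = (b && l.all (fun c => decide (c ∈ octChars))) := by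
  induction l generalizing b with
  | nil => simp
  | cons c cs ih =>
      rw [List.foldl_cons, ih]
      by_cases hc : c ∈ octChars <;> simp [hc]

theorem foldl_range_add (g : Nat → Int) (a : Int) (n : Nat) :
    (List.range n).foldl (fun r i => r + g i) a = a + ∑ i ∈ Finset.range n, g i := by
  induction n generalizing a with
  | zero => simp
  | succ n ih =>
      rw [List.range_succ, List.foldl_append, ih, Finset.sum_range_succ]
      simp [add_assoc]

theorem sum_eq (l : List Char) :
    (List.range l.length).foldl
      (fun res i => res + (((l.getD i ' ').toNat : Int) - 48) * 8 ^ (l.length - (i + 1))) 0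
      = octVal l := by
  induction l with
  | nil => simp [octVal]
  | cons c cs ih =>
      rw [foldl_range_add] at ih ⊢
      simp only [List.length_cons]
      rw [Finset.sum_range_succ']
      simp only [List.getD_cons_succ, List.getD_cons_zero,
        show ∀ i : Nat, cs.length + 1 - (i + 1 + 1) = cs.length - (i + 1) from fun i => by omega,
        Nat.add_sub_cancel, octVal]
      linarith [ih]

theorem horner_some (l : List Char) (a : Int)
    (h : ∀ c ∈ l, c ∈ octChars) :
    hornerGo a l = some (a * 8 ^ l.length + octVal l) := by
  induction l generalizing a with
  | nil => simp [hornerGo, octVal]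
  | cons c cs ih =>
      have hc := (octChar_iff c).mp (h c (List.mem_cons_self ..))
      rw [hornerGo, if_pos hc, ih _ (fun x hx => h x (List.mem_cons_of_mem _ hx))]
      congr 1
      simp [octVal, pow_succ]
      ring

theorem horner_none (l : List Char) (a : Int)
    (h : ¬ ∀ c ∈ l, c ∈ octChars) :
    hornerGo a l = none := by
  induction l generalizing a with
  | nil => exact absurd (by simp) h
  | cons c cs ih =>
      by_cases hc : c ∈ octChars
      · rw [hornerGo, if_pos ((octChar_iff c).mp hc)]
        exact ih _ (fun hall => h (by intro x hx; rcases List.mem_cons.mp hx with rfl | hx; exacts [hc, hall x hx]))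
      · rw [hornerGo, if_neg (fun hd => hc ((octChar_iff c).mpr hd))]

-- ===== VERDICT (by name: the statement is the Claim_ definition above) =====
theorem oct2dec_spec : Claim_equal_oct2dec := by
  intro number _
  unfold Spec_oct2dec oct2dec oct2dec_alt
  simp only [flag_eq, Bool.true_and]
  by_cases h : ∀ c ∈ number.toList, c ∈ octChars
  · rw [if_pos (by simpa [List.all_eq_true] using h), sum_eq, horner_some _ _ h]
    simp
  · rw [if_neg (by simpa [List.all_eq_true] using h), horner_none _ _ h]
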